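-- pv_equiv track=rewrite | github.com/dietmarja/ECM | generators/generate_curricula_v2.py | generate_module_outcomes
-- ===== SOURCE A (Python) =====
-- def generate_module_outcomes(curriculum_data):
--     """Generate individual module learning outcomes with highly distinctive competence verbs"""
--     module_outcomes = []
--
--     for i, module_name in enumerate(curriculum_data['modules']):
--         # Generate EQF-appropriate outcomes with highly distinctive competence verbs per module
--         if 'Leadership' in module_name or 'Strategic' in module_name:
--             knowledge = f"Evaluate leadership theories, change management principles, and organizational dynamics relevant to {module_name.lower()}"
--             skills = f"Apply leadership techniques, stakeholder engagement methods, and change management approaches in {module_name.lower()} contexts"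
--             competences = f"Champion strategic transformation initiatives, orchestrate organizational change processes, and steward executive stakeholder alignment in {module_name.lower()} practice"
--         elif 'Data' in module_name or 'Analytics' in module_name:
--             knowledge = f"Analyze data analysis methodologies, statistical techniques, and data management principles for {module_name.lower()}"
--             skills = f"Apply analytical tools, visualization software, and reporting platforms for {module_name.lower()} implementation"
--             competences = f"Govern analytical workflows, ensure data integrity protocols, and pioneer evidence-based decision-making in {module_name.lower()} contexts"
--         elif 'Technology' in module_name or 'Digital' in module_name or 'Tools' in module_name:
--             knowledge = f"Understand digital technologies, system integration principles, and technical standards relevant to {module_name.lower()}"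
--             skills = f"Apply digital tools, implementation methodologies, and technical solutions for {module_name.lower()} delivery"
--             competences = f"Orchestrate technology integration workflows, champion digital innovation processes, and cultivate technical excellence in {module_name.lower()} contexts"
--         elif 'Monitoring' in module_name or 'Reporting' in module_name or 'Performance' in module_name:
--             knowledge = f"Understand monitoring frameworks, reporting standards, and performance measurement principles for {module_name.lower()}"
--             skills = f"Apply monitoring tools, reporting methodologies, and performance analysis techniques for {module_name.lower()} implementation"
--             competences = f"Govern stakeholder-facing performance reporting, orchestrate measurement workflows, and nurture accountability standards in {module_name.lower()} contexts"
--         elif 'Management' in module_name or 'Coordination' in module_name: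
--             knowledge = f"Understand management principles, coordination frameworks, and organizational systems relevant to {module_name.lower()}"
--             skills = f"Apply management techniques, coordination methods, and organizational tools for {module_name.lower()} delivery"
--             competences = f"Oversee cross-functional programme coordination, facilitate multi-stakeholder operations, and steward operational excellence in {module_name.lower()} contexts"
--         elif 'Advisory' in module_name or 'Consultant' in module_name or 'Client' in module_name:
--             knowledge = f"Understand advisory methodologies, client engagement principles, and consultation frameworks for {module_name.lower()}"
--             skills = f"Apply consultation techniques, client analysis methods, and advisory tools for {module_name.lower()} delivery"
--             competences = f"Nurture advisory relationships, cultivate client partnerships, and champion stakeholder trust in {module_name.lower()} contexts"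
--         elif 'Design' in module_name or 'Architecture' in module_name or 'Solution' in module_name:
--             knowledge = f"Understand design principles, architectural frameworks, and solution methodologies for {module_name.lower()}"
--             skills = f"Apply design techniques, architectural methods, and solution development tools for {module_name.lower()} implementation"
--             competences = f"Pioneer design innovation workflows, architect sustainable solutions, and cultivate creative excellence in {module_name.lower()} contexts"
--         elif 'Training' in module_name or 'Education' in module_name or 'Development' in module_name:
--             knowledge = f"Understand educational principles, training methodologies, and development frameworks for {module_name.lower()}"
--             skills = f"Apply training techniques, educational tools, and development methods for {module_name.lower()} delivery"
--             competences = f"Facilitate capability development activities, nurture learning environments, and steward professional progression in {module_name.lower()} contexts"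
--         elif 'Change' in module_name:
--             knowledge = f"Understand change management theories, organizational transformation principles, and change implementation frameworks for {module_name.lower()}"
--             skills = f"Apply change management techniques, transformation methodologies, and implementation tools for {module_name.lower()} delivery"
--             competences = f"Navigate organizational transformation activities, shepherd change processes, and champion stakeholder adoption in {module_name.lower()} contexts"
--         else:
--             knowledge = f"Understand core principles, theoretical frameworks, and methodological approaches relevant to {module_name.lower()}"
--             skills = f"Apply practical techniques, professional tools, and implementation methodologies for {module_name.lower()} delivery"
--             competences = f"Coordinate professional activities, nurture quality standards, and steward stakeholder relationships in {module_name.lower()} contexts"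
--
--         module_outcomes.append({
--             'module_name': module_name,
--             'knowledge_outcome': knowledge,
--             'skills_outcome': skills,
--             'competences_outcome': competences
--         })
--
--     return module_outcomes
-- ===== SOURCE B (Python) =====
-- # Transposed two-stage algorithm: iterate over the RULES from lowest to highest
-- # priority, overwriting a per-module choice array (last write = highest-priority
-- # match wins, so choice == index of the first matching rule of the elif chain);
-- # then render every module from its chosen template in a second pass.
--
-- _KEYWORDS = [
--     ["Leadership", "Strategic"],
--     ["Data", "Analytics"],
--     ["Technology", "Digital", "Tools"],
--     ["Monitoring", "Reporting", "Performance"],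
--     ["Management", "Coordination"],
--     ["Advisory", "Consultant", "Client"],
--     ["Design", "Architecture", "Solution"],
--     ["Training", "Education", "Development"],
--     ["Change"],
-- ]
--
-- # (knowledge prefix, (skills prefix, suffix), (competences prefix, suffix));
-- # index len(_KEYWORDS) (== 9) is the default template.
-- _TEMPLATES = [
--     ("Evaluate leadership theories, change management principles, and organizational dynamics relevant to ",
--      ("Apply leadership techniques, stakeholder engagement methods, and change management approaches in ", " contexts"),
--      ("Champion strategic transformation initiatives, orchestrate organizational change processes, and steward executive stakeholder alignment in ", " practice")),
--     ("Analyze data analysis methodologies, statistical techniques, and data management principles for ",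
--      ("Apply analytical tools, visualization software, and reporting platforms for ", " implementation"),
--      ("Govern analytical workflows, ensure data integrity protocols, and pioneer evidence-based decision-making in ", " contexts")),
--     ("Understand digital technologies, system integration principles, and technical standards relevant to ",
--      ("Apply digital tools, implementation methodologies, and technical solutions for ", " delivery"),
--      ("Orchestrate technology integration workflows, champion digital innovation processes, and cultivate technical excellence in ", " contexts")),
--     ("Understand monitoring frameworks, reporting standards, and performance measurement principles for ",
--      ("Apply monitoring tools, reporting methodologies, and performance analysis techniques for ", " implementation"),
--      ("Govern stakeholder-facing performance reporting, orchestrate measurement workflows, and nurture accountability standards in ", " contexts")),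
--     ("Understand management principles, coordination frameworks, and organizational systems relevant to ",
--      ("Apply management techniques, coordination methods, and organizational tools for ", " delivery"),
--      ("Oversee cross-functional programme coordination, facilitate multi-stakeholder operations, and steward operational excellence in ", " contexts")),
--     ("Understand advisory methodologies, client engagement principles, and consultation frameworks for ",
--      ("Apply consultation techniques, client analysis methods, and advisory tools for ", " delivery"),
--      ("Nurture advisory relationships, cultivate client partnerships, and champion stakeholder trust in ", " contexts")),
--     ("Understand design principles, architectural frameworks, and solution methodologies for ",
--      ("Apply design techniques, architectural methods, and solution development tools for ", " implementation"),
--      ("Pioneer design innovation workflows, architect sustainable solutions, and cultivate creative excellence in ", " contexts")),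
--     ("Understand educational principles, training methodologies, and development frameworks for ",
--      ("Apply training techniques, educational tools, and development methods for ", " delivery"),
--      ("Facilitate capability development activities, nurture learning environments, and steward professional progression in ", " contexts")),
--     ("Understand change management theories, organizational transformation principles, and change implementation frameworks for ",
--      ("Apply change management techniques, transformation methodologies, and implementation tools for ", " delivery"),
--      ("Navigate organizational transformation activities, shepherd change processes, and champion stakeholder adoption in ", " contexts")),
--     ("Understand core principles, theoretical frameworks, and methodological approaches relevant to ",
--      ("Apply practical techniques, professional tools, and implementation methodologies for ", " delivery"),
--      ("Coordinate professional activities, nurture quality standards, and steward stakeholder relationships in ", " contexts")),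
-- ]
--
--
-- def generate_module_outcomes(curriculum_data):
--     modules = list(curriculum_data['modules'])
--     # stage 1: rule-major sweep, lowest priority first; later (higher-priority)
--     # sweeps overwrite, so the final value is the first-matching rule's index.
--     choice = [len(_KEYWORDS)] * len(modules)
--     for r in range(len(_KEYWORDS) - 1, -1, -1):
--         kws = _KEYWORDS[r]
--         choice = [r if any(w in name for w in kws) else c
--                   for name, c in zip(modules, choice)]
--     # stage 2: render
--     out = []
--     for name, c in zip(modules, choice):
--         m = name.lower()
--         k, (sp, ss), (cp, cs) = _TEMPLATES[c]
--         out.append({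
--             'module_name': name,
--             'knowledge_outcome': k + m,
--             'skills_outcome': sp + m + ss,
--             'competences_outcome': cp + m + cs,
--         })
--     return out
-- ===== Notes on version B (the rewrite author's own statement) =====
-- stated objective: alternative
-- what changed: Transposes the computation: instead of running the ten-branch elif chain per module, B sweeps the rules from lowest to highest priority over a per-module choice array, letting later (higher-priority) sweeps overwrite earlier ones so the final index equals the first-matching elif branch, then renders all modules from the chosen templates in a separate second pass.
import Mathlib
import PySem

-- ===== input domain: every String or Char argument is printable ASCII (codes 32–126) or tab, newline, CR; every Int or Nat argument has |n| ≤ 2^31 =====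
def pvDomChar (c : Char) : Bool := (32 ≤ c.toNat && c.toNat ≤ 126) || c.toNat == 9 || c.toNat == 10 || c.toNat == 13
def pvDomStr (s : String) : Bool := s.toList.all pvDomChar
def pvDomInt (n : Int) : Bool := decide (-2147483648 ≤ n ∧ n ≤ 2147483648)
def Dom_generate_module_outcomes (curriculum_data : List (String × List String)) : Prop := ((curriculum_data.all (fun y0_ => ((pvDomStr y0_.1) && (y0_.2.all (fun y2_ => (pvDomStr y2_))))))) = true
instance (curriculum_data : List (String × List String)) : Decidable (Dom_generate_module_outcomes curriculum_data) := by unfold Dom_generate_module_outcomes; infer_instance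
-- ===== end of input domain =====

-- B transposes A's per-module elif chain into rule-major overwrite sweeps over a choice array plus a render pass; same outcome text.
-- Equivalence is about the RETURN value; neither program mutates its argument.

-- ===== PORT A =====
-- one iteration of A's loop body: the elif chain picking knowledge/skills/competences texts
def pvRowA (module_name : String) : List (String × String) :=
  let m := PySem.Str.lower module_name
  let (knowledge, skills, competences) :=
    if PySem.Str.isIn "Leadership" module_name || PySem.Str.isIn "Strategic" module_name then
      ("Evaluate leadership theories, change management principles, and organizational dynamics relevant to " ++ m,
       "Apply leadership techniques, stakeholder engagement methods, and change management approaches in " ++ m ++ " contexts",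
       "Champion strategic transformation initiatives, orchestrate organizational change processes, and steward executive stakeholder alignment in " ++ m ++ " practice")
    else if PySem.Str.isIn "Data" module_name || PySem.Str.isIn "Analytics" module_name then
      ("Analyze data analysis methodologies, statistical techniques, and data management principles for " ++ m,
       "Apply analytical tools, visualization software, and reporting platforms for " ++ m ++ " implementation",
       "Govern analytical workflows, ensure data integrity protocols, and pioneer evidence-based decision-making in " ++ m ++ " contexts")
    else if PySem.Str.isIn "Technology" module_name || PySem.Str.isIn "Digital" module_name || PySem.Str.isIn "Tools" module_name then
      ("Understand digital technologies, system integration principles, and technical standards relevant to " ++ m,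
       "Apply digital tools, implementation methodologies, and technical solutions for " ++ m ++ " delivery",
       "Orchestrate technology integration workflows, champion digital innovation processes, and cultivate technical excellence in " ++ m ++ " contexts")
    else if PySem.Str.isIn "Monitoring" module_name || PySem.Str.isIn "Reporting" module_name || PySem.Str.isIn "Performance" module_name then
      ("Understand monitoring frameworks, reporting standards, and performance measurement principles for " ++ m,
       "Apply monitoring tools, reporting methodologies, and performance analysis techniques for " ++ m ++ " implementation",
       "Govern stakeholder-facing performance reporting, orchestrate measurement workflows, and nurture accountability standards in " ++ m ++ " contexts")
    else if PySem.Str.isIn "Management" module_name || PySem.Str.isIn "Coordination" module_name then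
      ("Understand management principles, coordination frameworks, and organizational systems relevant to " ++ m,
       "Apply management techniques, coordination methods, and organizational tools for " ++ m ++ " delivery",
       "Oversee cross-functional programme coordination, facilitate multi-stakeholder operations, and steward operational excellence in " ++ m ++ " contexts")
    else if PySem.Str.isIn "Advisory" module_name || PySem.Str.isIn "Consultant" module_name || PySem.Str.isIn "Client" module_name then
      ("Understand advisory methodologies, client engagement principles, and consultation frameworks for " ++ m,
       "Apply consultation techniques, client analysis methods, and advisory tools for " ++ m ++ " delivery",
       "Nurture advisory relationships, cultivate client partnerships, and champion stakeholder trust in " ++ m ++ " contexts")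
    else if PySem.Str.isIn "Design" module_name || PySem.Str.isIn "Architecture" module_name || PySem.Str.isIn "Solution" module_name then
      ("Understand design principles, architectural frameworks, and solution methodologies for " ++ m,
       "Apply design techniques, architectural methods, and solution development tools for " ++ m ++ " implementation",
       "Pioneer design innovation workflows, architect sustainable solutions, and cultivate creative excellence in " ++ m ++ " contexts")
    else if PySem.Str.isIn "Training" module_name || PySem.Str.isIn "Education" module_name || PySem.Str.isIn "Development" module_name then
      ("Understand educational principles, training methodologies, and development frameworks for " ++ m,
       "Apply training techniques, educational tools, and development methods for " ++ m ++ " delivery",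
       "Facilitate capability development activities, nurture learning environments, and steward professional progression in " ++ m ++ " contexts")
    else if PySem.Str.isIn "Change" module_name then
      ("Understand change management theories, organizational transformation principles, and change implementation frameworks for " ++ m,
       "Apply change management techniques, transformation methodologies, and implementation tools for " ++ m ++ " delivery",
       "Navigate organizational transformation activities, shepherd change processes, and champion stakeholder adoption in " ++ m ++ " contexts")
    else
      ("Understand core principles, theoretical frameworks, and methodological approaches relevant to " ++ m,
       "Apply practical techniques, professional tools, and implementation methodologies for " ++ m ++ " delivery",
       "Coordinate professional activities, nurture quality standards, and steward stakeholder relationships in " ++ m ++ " contexts")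
  [("module_name", module_name), ("knowledge_outcome", knowledge),
   ("skills_outcome", skills), ("competences_outcome", competences)]

def generate_module_outcomes (curriculum_data : List (String × List String)) : List (List (String × String)) :=
  match (PySem.Dict.mk curriculum_data).get? "modules" with
  | none => []   -- Python raises KeyError here; excluded by Pre_
  | some modules => modules.foldl (fun acc module_name => acc ++ [pvRowA module_name]) []

-- ===== PORT B =====
def pvKeywords : List (List String) :=
  [ ["Leadership", "Strategic"],
    ["Data", "Analytics"],
    ["Technology", "Digital", "Tools"],
    ["Monitoring", "Reporting", "Performance"],
    ["Management", "Coordination"],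
    ["Advisory", "Consultant", "Client"],
    ["Design", "Architecture", "Solution"],
    ["Training", "Education", "Development"],
    ["Change"] ]

-- (knowledge prefix, (skills prefix, suffix), (competences prefix, suffix)); index 9 is the default
def pvTemplates : List (String × (String × String) × (String × String)) :=
  [ ("Evaluate leadership theories, change management principles, and organizational dynamics relevant to ",
     ("Apply leadership techniques, stakeholder engagement methods, and change management approaches in ", " contexts"),
     ("Champion strategic transformation initiatives, orchestrate organizational change processes, and steward executive stakeholder alignment in ", " practice")),
    ("Analyze data analysis methodologies, statistical techniques, and data management principles for ",
     ("Apply analytical tools, visualization software, and reporting platforms for ", " implementation"),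
     ("Govern analytical workflows, ensure data integrity protocols, and pioneer evidence-based decision-making in ", " contexts")),
    ("Understand digital technologies, system integration principles, and technical standards relevant to ",
     ("Apply digital tools, implementation methodologies, and technical solutions for ", " delivery"),
     ("Orchestrate technology integration workflows, champion digital innovation processes, and cultivate technical excellence in ", " contexts")),
    ("Understand monitoring frameworks, reporting standards, and performance measurement principles for ",
     ("Apply monitoring tools, reporting methodologies, and performance analysis techniques for ", " implementation"),
     ("Govern stakeholder-facing performance reporting, orchestrate measurement workflows, and nurture accountability standards in ", " contexts")),
    ("Understand management principles, coordination frameworks, and organizational systems relevant to ",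
     ("Apply management techniques, coordination methods, and organizational tools for ", " delivery"),
     ("Oversee cross-functional programme coordination, facilitate multi-stakeholder operations, and steward operational excellence in ", " contexts")),
    ("Understand advisory methodologies, client engagement principles, and consultation frameworks for ",
     ("Apply consultation techniques, client analysis methods, and advisory tools for ", " delivery"),
     ("Nurture advisory relationships, cultivate client partnerships, and champion stakeholder trust in ", " contexts")),
    ("Understand design principles, architectural frameworks, and solution methodologies for ",
     ("Apply design techniques, architectural methods, and solution development tools for ", " implementation"),
     ("Pioneer design innovation workflows, architect sustainable solutions, and cultivate creative excellence in ", " contexts")),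
    ("Understand educational principles, training methodologies, and development frameworks for ",
     ("Apply training techniques, educational tools, and development methods for ", " delivery"),
     ("Facilitate capability development activities, nurture learning environments, and steward professional progression in ", " contexts")),
    ("Understand change management theories, organizational transformation principles, and change implementation frameworks for ",
     ("Apply change management techniques, transformation methodologies, and implementation tools for ", " delivery"),
     ("Navigate organizational transformation activities, shepherd change processes, and champion stakeholder adoption in ", " contexts")),
    ("Understand core principles, theoretical frameworks, and methodological approaches relevant to ",
     ("Apply practical techniques, professional tools, and implementation methodologies for ", " delivery"),
     ("Coordinate professional activities, nurture quality standards, and steward stakeholder relationships in ", " contexts")) ]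

-- one rule-major sweep of stage 1: overwrite the choice of every module matching rule r
def pvSweep (modules : List String) (choice : List Int) (r : Int) : List Int :=
  let kws := (PySem.List.pyGet? pvKeywords r).getD []   -- _KEYWORDS[r]; r always in range
  (modules.zip choice).map (fun p => if kws.any (fun w => PySem.Str.isIn w p.1) then r else p.2)

-- stage-2 rendering of one module from its chosen template index
def pvRender (name : String) (c : Int) : List (String × String) :=
  let m := PySem.Str.lower name
  let t := (PySem.List.pyGet? pvTemplates c).getD ("", ("", ""), ("", ""))   -- _TEMPLATES[c]; c always in range
  [("module_name", name),
   ("knowledge_outcome", t.1 ++ m),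
   ("skills_outcome", t.2.1.1 ++ m ++ t.2.1.2),
   ("competences_outcome", t.2.2.1 ++ m ++ t.2.2.2)]

def generate_module_outcomes_alt (curriculum_data : List (String × List String)) : List (List (String × String)) :=
  match (PySem.Dict.mk curriculum_data).get? "modules" with
  | none => []   -- Python raises KeyError here; excluded by Pre_
  | some modules =>
    -- stage 1: sweep rules from lowest to highest priority, overwriting
    let choice :=
      (PySem.List.pyRange ((pvKeywords.length : Int) - 1) (-1) (-1)).foldl
        (pvSweep modules) (List.replicate modules.length (pvKeywords.length : Int))
    -- stage 2: render
    (modules.zip choice).foldl (fun out p => out ++ [pvRender p.1 p.2]) []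

-- ===== PRECONDITION & SPEC =====
-- Pre_ excludes exactly the inputs with no 'modules' key, on which A (and B) raise KeyError.
def Pre_generate_module_outcomes (curriculum_data : List (String × List String)) : Prop :=
  "modules" ∈ curriculum_data.map Prod.fst
instance (curriculum_data : List (String × List String)) : Decidable (Pre_generate_module_outcomes curriculum_data) := by unfold Pre_generate_module_outcomes; infer_instance

def pvWitness_generate_module_outcomes : (List (String × List String)) :=
  [("modules", ["Data Lab", "Intro"])]

def Spec_generate_module_outcomes (curriculum_data : List (String × List String)) (out : List (List (String × String))) : Prop := out = generate_module_outcomes_alt curriculum_data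
instance (curriculum_data : List (String × List String)) (out : List (List (String × String))) : Decidable (Spec_generate_module_outcomes curriculum_data out) := by unfold Spec_generate_module_outcomes; infer_instance

-- ===== CLAIM =====
def Claim_equal_generate_module_outcomes : Prop := ∀ (curriculum_data : List (String × List String)), Dom_generate_module_outcomes curriculum_data → Pre_generate_module_outcomes curriculum_data → Spec_generate_module_outcomes curriculum_data (generate_module_outcomes curriculum_data)

-- ===== LEMMAS AND PROOFS =====

-- mapping over a list zipped with a mapped copy of itself is a map over the list
theorem pv_zip_map_self {α β γ : Type} (f : α × β → γ) (g : α → β) :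
    ∀ (l : List α), ((l.zip (l.map g)).map f) = l.map (fun a => f (a, g a)) := by
  intro l; induction l with
  | nil => rfl
  | cons a l ih => simp [List.zip_cons_cons, ih]

-- the per-module result of the nine overwrite sweeps (highest priority processed last wins)
def pvChoiceOf (name : String) : Int :=
  [((8:Int), ["Change"]),
   (7, ["Training", "Education", "Development"]),
   (6, ["Design", "Architecture", "Solution"]),
   (5, ["Advisory", "Consultant", "Client"]),
   (4, ["Management", "Coordination"]),
   (3, ["Monitoring", "Reporting", "Performance"]),
   (2, ["Technology", "Digital", "Tools"]),
   (1, ["Data", "Analytics"]),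
   (0, ["Leadership", "Strategic"])].foldl
    (fun c p => if p.2.any (fun w => PySem.Str.isIn w name) then p.1 else c) 9

-- stage 1 computes, per module, exactly pvChoiceOf
theorem pv_choice_eq (modules : List String) :
    (PySem.List.pyRange ((pvKeywords.length : Int) - 1) (-1) (-1)).foldl
        (pvSweep modules) (List.replicate modules.length (pvKeywords.length : Int))
      = modules.map pvChoiceOf := by
  have hr : PySem.List.pyRange ((pvKeywords.length : Int) - 1) (-1) (-1)
      = [(8:Int),7,6,5,4,3,2,1,0] := by decide
  have hrep : List.replicate modules.length ((pvKeywords.length : Int))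
      = modules.map (fun _ => (9:Int)) := by
    simp [List.map_const', pvKeywords]
  rw [hr, hrep]
  simp only [List.foldl_cons, List.foldl_nil, pvSweep, pv_zip_map_self]
  rfl

-- the elif chain and the sweep result render identically for every module name
theorem pvRow_eq (name : String) : pvRowA name = pvRender name (pvChoiceOf name) := by
  simp only [pvRowA, pvRender, pvChoiceOf, List.foldl_cons, List.foldl_nil,
    List.any_cons, List.any_nil, Bool.or_false, ← Bool.or_assoc]
  cases (PySem.Str.isIn "Leadership" name || PySem.Str.isIn "Strategic" name) <;>
  cases (PySem.Str.isIn "Data" name || PySem.Str.isIn "Analytics" name) <;>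
  cases (PySem.Str.isIn "Technology" name || PySem.Str.isIn "Digital" name || PySem.Str.isIn "Tools" name) <;>
  cases (PySem.Str.isIn "Monitoring" name || PySem.Str.isIn "Reporting" name || PySem.Str.isIn "Performance" name) <;>
  cases (PySem.Str.isIn "Management" name || PySem.Str.isIn "Coordination" name) <;>
  cases (PySem.Str.isIn "Advisory" name || PySem.Str.isIn "Consultant" name || PySem.Str.isIn "Client" name) <;>
  cases (PySem.Str.isIn "Design" name || PySem.Str.isIn "Architecture" name || PySem.Str.isIn "Solution" name) <;>
  cases (PySem.Str.isIn "Training" name || PySem.Str.isIn "Education" name || PySem.Str.isIn "Development" name) <;>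
  cases (PySem.Str.isIn "Change" name) <;> rfl

-- ===== VERDICT =====
theorem generate_module_outcomes_spec : Claim_equal_generate_module_outcomes := by
  intro curriculum_data _ _
  unfold Spec_generate_module_outcomes generate_module_outcomes generate_module_outcomes_alt
  cases (PySem.Dict.mk curriculum_data).get? "modules" with
  | none => rfl
  | some modules =>
      simp only [pv_choice_eq, PySem.List.foldl_append_singleton_eq_map,
        pv_zip_map_self, List.nil_append]
      exact List.map_congr_left fun name _ => pvRow_eq name
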